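-- pv_equiv track=rewrite | github.com/Jack-Meade/Phutball | server.py | _heuristic
-- ===== SOURCE A (Python) =====
-- def _heuristic(board):
--     score = 0
--     for y in range(len(board)):
--         for x in range(len(board[y])):
--             if board[y][x] == 2:
--                 if   y < len(board)//2: score -= 1
--                 elif y > len(board)//2: score += 1
--
--             elif board[y][x] == 1:
--                 if   y <= 1:            return -1000
--                 elif y >= len(board)-1: return 1000
--                 else:
--                     if   y < len(board)//2: score -= 10 * y
--                     elif y > len(board)//2: score += 10 * y
--
--     return score
-- ===== SOURCE B (Python) =====
-- def _heuristic(board):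
--     n = len(board)
--     # flatten the board once into the y-coordinates of the balls (1s), top-down
--     ones = [y for y, row in enumerate(board) for c in row if c == 1]
--     if ones and ones[0] <= 1:
--         return -1000
--     if ones and ones[-1] >= n - 1:
--         return 1000
--     # no terminal ball: aggregate the coordinate lists arithmetically
--     m = n // 2
--     twos = [y for y, row in enumerate(board) for c in row if c == 2]
--     return sum(1 if y > m else -1 for y in twos if y != m) \
--          + sum(10 * y if y > m else -10 * y for y in ones if y != m)
-- ===== Notes on version B (the rewrite author's own statement) =====
-- stated objective: alternative
-- what changed: Replaced A's cell-by-cell accumulating loop with early returns by a coordinate-list representation: flatten the board once into the y-coordinate lists of the 1s and 2s, read the terminal verdicts off the first/last element of the ones list, and compute the score as two arithmetic sums over those coordinate lists.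
import Mathlib
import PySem

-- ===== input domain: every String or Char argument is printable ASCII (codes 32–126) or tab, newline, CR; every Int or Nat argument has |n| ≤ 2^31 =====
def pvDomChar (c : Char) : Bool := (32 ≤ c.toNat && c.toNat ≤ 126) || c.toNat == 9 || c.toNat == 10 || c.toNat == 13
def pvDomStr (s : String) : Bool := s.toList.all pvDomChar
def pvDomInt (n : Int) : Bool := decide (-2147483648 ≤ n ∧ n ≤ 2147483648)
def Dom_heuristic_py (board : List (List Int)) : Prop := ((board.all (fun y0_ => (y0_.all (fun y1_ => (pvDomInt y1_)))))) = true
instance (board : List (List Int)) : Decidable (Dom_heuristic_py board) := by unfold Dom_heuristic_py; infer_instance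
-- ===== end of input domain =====

-- B replaces A's accumulate-with-early-returns cell loop by a coordinate-list representation:
-- flatten the board once into y-coordinate lists of the 1s and 2s, read the terminal verdicts off
-- the first/last element of the ones list, then score by two sums over the coordinate lists
-- (objective: alternative).

-- ===== PORT A =====
-- one cell of A's inner loop body: .inl v = 'return v', .inr s = updated score
def pvA_cell (n y c score : Int) : Sum Int Int :=
  if c = 2 then
    if y < PySem.Int.floordiv n 2 then .inr (score - 1)
    else if y > PySem.Int.floordiv n 2 then .inr (score + 1)
    else .inr score
  else if c = 1 then
    if y ≤ 1 then .inl (-1000)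
    else if y ≥ n - 1 then .inl 1000
    else if y < PySem.Int.floordiv n 2 then .inr (score - 10 * y)
    else if y > PySem.Int.floordiv n 2 then .inr (score + 10 * y)
    else .inr score
  else .inr score

-- 'for x in range(len(board[y]))'
def pvA_row (n y : Int) : List Int → Int → Sum Int Int
  | [], score => .inr score
  | c :: cs, score =>
    match pvA_cell n y c score with
    | .inl v => .inl v
    | .inr s => pvA_row n y cs s

-- 'for y in range(len(board))'
def pvA_rows (n : Int) : Int → List (List Int) → Int → Sum Int Int
  | _, [], score => .inr score
  | y, r :: rs, score =>
    match pvA_row n y r score with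
    | .inl v => .inl v
    | .inr s => pvA_rows n (y + 1) rs s

def heuristic_py (board : List (List Int)) : Int :=
  match pvA_rows (board.length : Int) 0 board 0 with
  | .inl v => v
  | .inr s => s

-- ===== PORT B =====
-- '[y for y, row in enumerate(board) for c in row if c == v]' (started at row index y)
def pvB_coords (v : Int) : Int → List (List Int) → List Int
  | _, [] => []
  | y, r :: rs => r.filterMap (fun c => if c = v then some y else none) ++ pvB_coords v (y + 1) rs

def heuristic_py_alt (board : List (List Int)) : Int :=
  let n : Int := (board.length : Int)
  let ones := pvB_coords 1 0 board
  -- 'if ones and ones[0] <= 1'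
  if ones.head?.any (fun y => decide (y ≤ 1)) then -1000
  -- 'if ones and ones[-1] >= n - 1'
  else if ones.getLast?.any (fun y => decide (y ≥ n - 1)) then 1000
  else
    let m := PySem.Int.floordiv n 2
    (((pvB_coords 2 0 board).filter (fun y => y != m)).map (fun y => if y > m then (1 : Int) else -1)).sum
      + ((ones.filter (fun y => y != m)).map (fun y => if y > m then 10 * y else -10 * y)).sum

-- ===== PRECONDITION & SPEC =====
def Spec_heuristic_py (board : List (List Int)) (out : Int) : Prop := out = heuristic_py_alt board
instance (board : List (List Int)) (out : Int) : Decidable (Spec_heuristic_py board out) := by unfold Spec_heuristic_py; infer_instance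

-- ===== CLAIM (what is proved, stated in full; the proofs are below) =====
def Claim_equal_heuristic_py : Prop := ∀ (board : List (List Int)), Dom_heuristic_py board → Spec_heuristic_py board (heuristic_py board)

-- ===== LEMMAS AND PROOFS =====

-- the score expression of the detect-then-score decomposition, used as a stepping stone between the two ports
def pvB_rowScore (m y : Int) (row : List Int) : Int :=
  if y ≠ m then
    (if y > m then 1 else -1) * ((row.count 2 : Int) + 10 * y * (row.count 1 : Int))
  else 0

def pvB_score (m y : Int) : List (List Int) → Int
  | [] => 0
  | r :: rs => pvB_rowScore m y r + pvB_score m (y + 1) rs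

-- the detect-then-score form; both ports are proved equal to it
def pvOldAlt (board : List (List Int)) : Int :=
  let n : Int := (board.length : Int)
  if (board.take 2).any (fun row => row.contains 1) then -1000
  else if n > 2 ∧ (PySem.List.pyGet? board (-1)).any (fun row => row.contains 1) then 1000
  else pvB_score (PySem.Int.floordiv n 2) 0 board

-- per-cell score increment of A's loop when it does not return early
def pvCell (n y c : Int) : Int :=
  if c = 2 then (if y < PySem.Int.floordiv n 2 then -1 else if y > PySem.Int.floordiv n 2 then 1 else 0)
  else if c = 1 then (if y < PySem.Int.floordiv n 2 then -10*y else if y > PySem.Int.floordiv n 2 then 10*y else 0)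
  else 0

theorem pvCell_spec (n y c score : Int) (h : c = 1 → 2 ≤ y ∧ y ≤ n - 2) :
    pvA_cell n y c score = .inr (score + pvCell n y c) := by
  unfold pvA_cell pvCell
  by_cases hc2 : c = 2
  · split_ifs <;> simp <;> try ring
  · by_cases hc1 : c = 1
    · obtain ⟨h2, hn2⟩ := h hc1
      simp only [hc2, hc1, if_true]
      split_ifs <;> first | omega | (simp; try ring)
    · simp [hc2, hc1]

-- B's row score is the sum of A's per-cell increments
theorem pvB_rowScore_eq (n y : Int) (row : List Int) :
    pvB_rowScore (PySem.Int.floordiv n 2) y row = (row.map (pvCell n y)).sum := by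
  induction row with
  | nil => simp [pvB_rowScore]
  | cons c cs ih =>
    simp only [List.map_cons, List.sum_cons, ← ih]
    simp only [pvB_rowScore, pvCell, List.count_cons]
    rcases lt_trichotomy y (PySem.Int.floordiv n 2) with h|h|h <;>
      split_ifs <;> simp_all <;> first | omega | (push_cast; try ring)

-- a row whose 1s (if any) sit strictly between the terminal rows accumulates exactly B's row score
theorem pvA_row_safe (n y : Int) (row : List Int)
    (h1 : (1 : Int) ∈ row → 2 ≤ y ∧ y ≤ n - 2) : ∀ score : Int,
    pvA_row n y row score = .inr (score + pvB_rowScore (PySem.Int.floordiv n 2) y row) := by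
  rw [pvB_rowScore_eq]
  induction row with
  | nil => intro score; simp [pvA_row]
  | cons c cs ih =>
    intro score
    have hc : c = 1 → 2 ≤ y ∧ y ≤ n - 2 := fun hc => h1 (by simp [hc])
    have htail := fun h => h1 (List.mem_cons_of_mem _ h)
    simp only [pvA_row, pvCell_spec n y c score hc, ih htail, List.map_cons, List.sum_cons]
    congr 1; ring

-- a row containing a 1 at a top terminal index returns -1000
theorem pvA_row_top (n y : Int) (row : List Int)
    (hy : y ≤ 1) (h1 : (1 : Int) ∈ row) : ∀ score : Int,
    pvA_row n y row score = .inl (-1000) := by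
  induction row with
  | nil => simp at h1
  | cons c cs ih =>
    intro score
    by_cases hc : c = 1
    · simp [pvA_row, pvA_cell, hc, hy]
    · have h1' : (1 : Int) ∈ cs := by rcases List.mem_cons.mp h1 with h|h; · omega
                                      · exact h
      simp only [pvA_row, pvCell_spec n y c score (fun h => absurd h hc)]
      exact ih h1' _

-- a row containing a 1 at the bottom terminal index returns 1000
theorem pvA_row_bot (n y : Int) (row : List Int)
    (hy2 : 2 ≤ y) (hyn : n - 1 ≤ y) (h1 : (1 : Int) ∈ row) : ∀ score : Int,
    pvA_row n y row score = .inl 1000 := by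
  induction row with
  | nil => simp at h1
  | cons c cs ih =>
    intro score
    by_cases hc : c = 1
    · simp [pvA_row, pvA_cell, hc, show ¬y ≤ 1 by omega, show y ≥ n - 1 from hyn]
    · have h1' : (1 : Int) ∈ cs := by rcases List.mem_cons.mp h1 with h|h; · omega
                                      · exact h
      simp only [pvA_row, pvCell_spec n y c score (fun h => absurd h hc)]
      exact ih h1' _

-- all remaining rows safe ⇒ A's outer loop accumulates B's score
theorem pvA_rows_safe (n : Int) (rs : List (List Int)) : ∀ (y score : Int),
    (∀ i (h : i < rs.length), (1 : Int) ∈ rs[i] → 2 ≤ y + i ∧ y + i ≤ n - 2) →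
    pvA_rows n y rs score = .inr (score + pvB_score (PySem.Int.floordiv n 2) y rs) := by
  induction rs with
  | nil => intro y score _; simp [pvA_rows, pvB_score]
  | cons r rest ih =>
    intro y score hsafe
    have h0 : (1 : Int) ∈ r → 2 ≤ y ∧ y ≤ n - 2 := by
      intro h; simpa using hsafe 0 (by simp) (by simpa using h)
    have htail : ∀ i (h : i < rest.length), (1 : Int) ∈ rest[i] → 2 ≤ (y+1) + i ∧ (y+1) + i ≤ n - 2 := by
      intro i hi hmem
      have := hsafe (i+1) (by simpa using Nat.succ_lt_succ hi) (by simpa using hmem)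
      push_cast at this ⊢; omega
    simp only [pvA_rows, pvA_row_safe n y r h0 score, ih (y+1) _ htail, pvB_score]
    congr 1; ring

-- 1s only at indices ≥ 2 and one in the last row ⇒ A's outer loop returns 1000
theorem pvA_rows_bot (n : Int) (rs : List (List Int)) : ∀ (y score : Int),
    rs ≠ [] →
    y + rs.length = n →
    (∀ i (h : i < rs.length), (1 : Int) ∈ rs[i] → 2 ≤ y + i) →
    (1 : Int) ∈ rs.getLastD [] →
    pvA_rows n y rs score = .inl 1000 := by
  induction rs with
  | nil => intro y score h; exact absurd rfl h
  | cons r rest ih =>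
    intro y score _ hlen hsafe hlast
    match rest, ih with
    | [], _ =>
      have hmem : (1 : Int) ∈ r := by simpa using hlast
      have h2 : 2 ≤ y := by simpa using hsafe 0 (by simp) hmem
      have hn : n - 1 ≤ y := by simp at hlen; omega
      simp [pvA_rows, pvA_row_bot n y r h2 hn hmem score]
    | r2 :: rest', ih =>
      have hlen' : y + 1 + ((r2 :: rest').length : Int) = n := by simp only [List.length_cons] at hlen ⊢; push_cast at hlen ⊢; omega
      have h0 : (1 : Int) ∈ r → 2 ≤ y ∧ y ≤ n - 2 := by
        intro h
        have := hsafe 0 (by simp) (by simpa using h)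
        simp only [List.length_cons] at hlen; push_cast at hlen; simp at this; omega
      have htail : ∀ i (h : i < (r2 :: rest').length), (1 : Int) ∈ (r2 :: rest')[i] → 2 ≤ (y+1) + i := by
        intro i hi hmem
        have := hsafe (i+1) (by simpa using Nat.succ_lt_succ hi) (by simpa using hmem)
        push_cast at this ⊢; omega
      have hlast' : (1 : Int) ∈ (r2 :: rest').getLastD [] := by
        simpa [List.getLastD_cons] using hlast
      simp only [pvA_rows, pvA_row_safe n y r h0 score]
      exact ih (y+1) _ (by simp) hlen' htail hlast'

-- A equals the detect-then-score form
theorem pvA_main (board : List (List Int)) : heuristic_py board = pvOldAlt board := by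
  unfold heuristic_py pvOldAlt
  by_cases h1 : (board.take 2).any (fun row => row.contains 1) = true
  · simp only [h1, if_true]
    match board with
    | [] => simp at h1
    | r0 :: rest =>
      by_cases hm0 : (1 : Int) ∈ r0
      · simp [pvA_rows, pvA_row_top _ 0 r0 (by norm_num) hm0 0]
      · match rest with
        | [] => simp [List.contains_iff_mem, hm0] at h1
        | r1 :: rest' =>
          have hm1 : (1 : Int) ∈ r1 := by
            simp [List.contains_iff_mem, hm0] at h1; exact h1
          simp only [pvA_rows, pvA_row_safe _ 0 r0 (fun h => absurd h hm0) 0,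
            pvA_row_top _ (0+1) r1 (by norm_num) hm1 _]
  · have hno : ∀ i (h : i < board.length), i < 2 → (1 : Int) ∉ board[i] := by
      intro i h hi2 hmem
      apply h1
      rw [List.any_eq_true]
      have hlt : i < (board.take 2).length := by simp [List.length_take]; omega
      exact ⟨(board.take 2)[i]'hlt, List.getElem_mem _,
        by rw [List.getElem_take]; exact List.contains_iff_mem.mpr hmem⟩
    simp only [h1, if_false, Bool.false_eq_true, if_neg (fun h => h1 h)]
    by_cases h2 : ((board.length : Int) > 2 ∧ (PySem.List.pyGet? board (-1)).any (fun row => row.contains 1) = true)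
    · obtain ⟨hn2, hany⟩ := h2
      have hlen3 : 3 ≤ board.length := by exact_mod_cast hn2
      have hne : board ≠ [] := by intro h; subst h; simp at hlen3
      obtain ⟨last, hlast⟩ : ∃ l, board.getLast? = some l := by
        cases hb : board.getLast? with
        | none => rw [List.getLast?_eq_none_iff] at hb; exact absurd hb hne
        | some l => exact ⟨l, rfl⟩
      have hlmem : (1 : Int) ∈ last := by
        rw [PySem.List.pyGet?_neg_one, hlast] at hany
        simpa [List.contains_iff_mem] using hany
      rw [if_pos ⟨hn2, by rw [PySem.List.pyGet?_neg_one, hlast]; simpa [List.contains_iff_mem] using hlmem⟩]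
      have := pvA_rows_bot (board.length : Int) board 0 0 hne (by omega)
        (by intro i hi hmem
            by_cases hi2 : i < 2
            · exact absurd hmem (hno i hi hi2)
            · push_cast; omega)
        (by rw [List.getLastD_eq_getLast?, hlast]; simpa using hlmem)
      simp [this]
    · rw [if_neg h2]
      have hsafe : ∀ i (h : i < board.length), (1 : Int) ∈ board[i] →
          2 ≤ (0 : Int) + i ∧ (0 : Int) + i ≤ (board.length : Int) - 2 := by
        intro i hi hmem
        have hi2 : ¬ i < 2 := fun h => (hno i hi h) hmem
        constructor
        · push_cast; omega
        · by_contra hgt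
          push_cast at hgt
          have hieq : i = board.length - 1 := by omega
          have hn3 : (board.length : Int) > 2 := by omega
          apply h2
          refine ⟨hn3, ?_⟩
          rw [PySem.List.pyGet?_neg_one, List.getLast?_eq_getElem?]
          have : board[board.length - 1]? = some board[i] := by
            rw [← hieq]; exact List.getElem?_eq_getElem hi
          rw [this]
          simpa [List.contains_iff_mem] using hmem
      have := pvA_rows_safe (board.length : Int) board 0 0 hsafe
      simp [this]

-- ===== bridging B's coordinate-list form to the detect-then-score form =====

-- the comprehension restricted to one row is count-many copies of its index
theorem pvRowCoords (v y : Int) (r : List Int) :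
    r.filterMap (fun c => if c = v then some y else none) = List.replicate (r.count v) y := by
  induction r with
  | nil => simp
  | cons c cs ih =>
    by_cases h : c = v <;>
      simp [List.filterMap_cons, h, List.count_cons, ih, List.replicate_succ]

theorem pvCoords_cons (v y : Int) (r : List Int) (rs : List (List Int)) :
    pvB_coords v y (r :: rs) = List.replicate (r.count v) y ++ pvB_coords v (y + 1) rs := by
  simp [pvB_coords, pvRowCoords]

-- every emitted coordinate is at least the starting row index
theorem pvCoords_lb (v : Int) (b : List (List Int)) : ∀ (y z : Int), z ∈ pvB_coords v y b → y ≤ z := by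
  induction b with
  | nil => intro y z h; simp [pvB_coords] at h
  | cons r rs ih =>
    intro y z h
    rw [pvCoords_cons, List.mem_append] at h
    rcases h with h | h
    · rw [List.eq_of_mem_replicate h]
    · have := ih (y + 1) z h; omega

theorem pvHeadMem {α : Type} (l : List α) (z : α) (h : l.head? = some z) : z ∈ l := by
  cases l <;> simp_all

theorem pvLastMem {α : Type} (l : List α) (z : α) (h : l.getLast? = some z) : z ∈ l := by
  induction l with
  | nil => simp at h
  | cons a l ih =>
    cases l with
    | nil => simp_all
    | cons b l' => rw [List.getLast?_cons_cons] at h; exact List.mem_cons_of_mem _ (ih h)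

theorem pvLastRep (y : Int) (k : Nat) : (List.replicate (k + 1) y).getLast? = some y := by
  induction k with
  | zero => simp
  | succ k ih => rw [show k + 1 + 1 = (k+1) + 1 from rfl, List.replicate_succ,
      show (k : Nat) + 1 = k + 1 from rfl, List.replicate_succ, List.getLast?_cons_cons,
      ← List.replicate_succ]; exact ih

theorem pvLastApp {α : Type} (a b : List α) (h : b ≠ []) : (a ++ b).getLast? = b.getLast? := by
  induction a with
  | nil => simp
  | cons x xs ih =>
    have hne : xs ++ b ≠ [] := by
      intro hc; rcases List.append_eq_nil_iff.mp hc with ⟨_, h2⟩; exact h h2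
    cases hxs : xs ++ b with
    | nil => exact absurd hxs hne
    | cons c cs => rw [List.cons_append, hxs, List.getLast?_cons_cons, ← hxs, ih]

-- the last coordinate of the ones list reaches the last row index iff the last row holds a ball
theorem pvLast (v : Int) : ∀ (board : List (List Int)) (y : Int) (last : List Int),
    board.getLast? = some last →
    ((pvB_coords v y board).getLast?.any (fun z => decide (y + (board.length : Int) - 1 ≤ z)))
      = last.contains v := by
  intro board
  induction board with
  | nil => intro y last h; simp at h
  | cons r rest ih =>
    intro y last hlast
    cases rest with
    | nil =>
      have hrl : r = last := by simpa using hlast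
      subst hrl
      rw [pvCoords_cons]
      cases hc : r.count v with
      | zero =>
        have : (v : Int) ∉ r := by rwa [← List.count_eq_zero]
        simp [pvB_coords, List.contains_iff_mem, this]
      | succ k =>
        have hm : (v : Int) ∈ r := List.count_pos_iff.mp (by omega)
        simp only [pvB_coords, List.append_nil, pvLastRep]
        simp [List.contains_iff_mem, hm]
    | cons r2 rest' =>
      rw [List.getLast?_cons_cons] at hlast
      rw [pvCoords_cons]
      have hfun : (fun z => decide (y + ((r :: r2 :: rest').length : Int) - 1 ≤ z))
          = (fun z => decide ((y + 1) + ((r2 :: rest').length : Int) - 1 ≤ z)) := by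
        funext z; rw [decide_eq_decide]; simp only [List.length_cons]; push_cast; omega
      by_cases hne : pvB_coords v (y + 1) (r2 :: rest') = []
      · have hfalse : last.contains v = false := by
          rw [← ih (y + 1) last hlast, hne]; rfl
        rw [hne, List.append_nil, hfalse]
        cases hc : r.count v with
        | zero => rfl
        | succ k =>
          rw [pvLastRep]
          have : ¬ (y + ((r :: r2 :: rest').length : Int) - 1 ≤ y) := by
            simp only [List.length_cons]; push_cast; omega
          simp [this]
      · rw [pvLastApp _ _ hne, hfun, ih (y + 1) last hlast]

-- the first coordinate of the ones list is ≤ 1 iff one of the first two rows holds a ball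
theorem pvHead (board : List (List Int)) :
    ((pvB_coords 1 0 board).head?.any (fun y => decide (y ≤ 1)))
      = (board.take 2).any (fun r => r.contains 1) := by
  have hrest : ∀ rest : List (List Int),
      ((pvB_coords 1 2 rest).head?.any (fun y => decide (y ≤ 1))) = false := by
    intro rest
    cases hh : (pvB_coords 1 2 rest).head? with
    | none => rfl
    | some z =>
      have hz : (2 : Int) ≤ z := pvCoords_lb 1 rest 2 z (pvHeadMem _ _ hh)
      simp [show ¬ (z ≤ 1) by omega]
  match board with
  | [] => rfl
  | [r0] =>
    rw [pvCoords_cons]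
    cases hc : r0.count 1 with
    | zero =>
      have : (1 : Int) ∉ r0 := by rwa [← List.count_eq_zero]
      simp [pvB_coords, List.contains_iff_mem, this]
    | succ k =>
      have hm : (1 : Int) ∈ r0 := List.count_pos_iff.mp (by omega)
      simp [pvB_coords, List.replicate_succ, List.contains_iff_mem, hm]
  | r0 :: r1 :: rest =>
    rw [pvCoords_cons, pvCoords_cons]
    by_cases h0 : (1 : Int) ∈ r0
    · cases hc : r0.count 1 with
      | zero => rw [List.count_eq_zero] at hc; exact absurd h0 hc
      | succ k => simp [List.replicate_succ, List.contains_iff_mem, h0]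
    · cases hc0 : r0.count 1 with
      | succ k => exact absurd (List.count_pos_iff.mp (by omega)) h0
      | zero =>
        by_cases h1 : (1 : Int) ∈ r1
        · cases hc1 : r1.count 1 with
          | zero => rw [List.count_eq_zero] at hc1; exact absurd h1 hc1
          | succ k => simp [List.replicate_succ, List.contains_iff_mem, h0, h1]
        · cases hc1 : r1.count 1 with
          | succ k => exact absurd (List.count_pos_iff.mp (by omega)) h1
          | zero =>
            simp only [List.replicate, List.nil_append]
            rw [show (0:Int) + 1 + 1 = 2 by norm_num] at *
            simp [hrest rest, List.contains_iff_mem, h0, h1]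

-- the filtered-mapped sum over count-many copies of a row index
theorem pvRepSum (k : Nat) (y m : Int) (f : Int → Int) :
    ((((List.replicate k y).filter (fun z => z != m)).map f)).sum
      = if y = m then 0 else (k : Int) * f y := by
  induction k with
  | zero => simp
  | succ k ih =>
    by_cases h : y = m
    · simp only [List.replicate_succ, List.filter_cons]
      simp [h, ih]
    · simp only [List.replicate_succ, List.filter_cons]
      simp only [show (y != m) = true by simp [bne_iff_ne, h], if_true, List.map_cons, List.sum_cons, ih]
      simp only [h, if_false]
      push_cast; ring

-- B's two coordinate sums equal the row-by-row score
theorem pvScoreEq (m : Int) (b : List (List Int)) : ∀ (y : Int),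
    (((pvB_coords 2 y b).filter (fun z => z != m)).map (fun z => if z > m then (1 : Int) else -1)).sum
      + (((pvB_coords 1 y b).filter (fun z => z != m)).map (fun z => if z > m then 10 * z else -10 * z)).sum
    = pvB_score m y b := by
  induction b with
  | nil => intro y; simp [pvB_coords, pvB_score]
  | cons r rs ih =>
    intro y
    rw [pvCoords_cons, pvCoords_cons]
    simp only [List.filter_append, List.map_append, List.sum_append,
      pvRepSum, pvB_score]
    have hrow : (if y = m then 0 else ((r.count 2 : Int)) * (if y > m then (1:Int) else -1))
        + (if y = m then 0 else ((r.count 1 : Int)) * (if y > m then 10 * y else -10 * y))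
        = pvB_rowScore m y r := by
      by_cases h : y = m
      · simp [pvB_rowScore, h]
      · by_cases hgt : y > m <;> simp [pvB_rowScore, h, hgt] <;> try ring
    linarith [hrow, ih (y + 1)]

-- B equals the detect-then-score form
theorem pvAltEq (board : List (List Int)) : heuristic_py_alt board = pvOldAlt board := by
  have halt : heuristic_py_alt board =
      (if ((pvB_coords 1 0 board).head?.any (fun y => decide (y ≤ 1))) then -1000
       else if ((pvB_coords 1 0 board).getLast?.any (fun y => decide (y ≥ (board.length : Int) - 1))) then 1000
       else (((pvB_coords 2 0 board).filter (fun y => y != PySem.Int.floordiv (board.length : Int) 2)).map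
              (fun y => if y > PySem.Int.floordiv (board.length : Int) 2 then (1 : Int) else -1)).sum
         + (((pvB_coords 1 0 board).filter (fun y => y != PySem.Int.floordiv (board.length : Int) 2)).map
              (fun y => if y > PySem.Int.floordiv (board.length : Int) 2 then 10 * y else -10 * y)).sum) := rfl
  have hold : pvOldAlt board =
      (if ((board.take 2).any (fun row => row.contains 1)) then -1000
       else if ((board.length : Int) > 2 ∧ (PySem.List.pyGet? board (-1)).any (fun row => row.contains 1)) then 1000
       else pvB_score (PySem.Int.floordiv (board.length : Int) 2) 0 board) := rfl
  rw [halt, hold, pvHead board]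
  by_cases h1 : (board.take 2).any (fun r => r.contains 1) = true
  · simp only [h1]; simp
  · rw [Bool.not_eq_true] at h1
    rw [h1]
    simp only [Bool.false_eq_true, if_false]
    cases hb : board.getLast? with
    | none =>
      have hnil : board = [] := List.getLast?_eq_none_iff.mp hb
      subst hnil
      simp [pvB_coords, pvB_score]
    | some last =>
      have hne : board ≠ [] := by
        intro h; subst h; simp at hb
      have hfun : (fun y => decide (y ≥ (board.length : Int) - 1))
          = (fun z => decide ((0 : Int) + (board.length : Int) - 1 ≤ z)) := by
        funext z; rw [decide_eq_decide]; constructor <;> intro <;> omega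
      rw [hfun, pvLast 1 board 0 last hb]
      by_cases hc : last.contains 1 = true
      · have hlm : (1 : Int) ∈ last := List.contains_iff_mem.mp hc
        have hn2 : (board.length : Int) > 2 := by
          by_contra hle
          have hlen2 : board.length ≤ 2 := by omega
          have : (board.take 2) = board := List.take_of_length_le hlen2
          rw [this] at h1
          rw [List.any_eq_false] at h1
          exact h1 last (pvLastMem _ _ hb) hc
        have hpy : (PySem.List.pyGet? board (-1)).any (fun row => row.contains 1) = true := by
          rw [PySem.List.pyGet?_neg_one, hb]; simpa using hc
        rw [hc, if_pos (And.intro hn2 hpy)]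
        simp
      · rw [Bool.not_eq_true] at hc
        rw [hc]
        simp only [Bool.false_eq_true, if_false]
        rw [if_neg]
        · exact pvScoreEq (PySem.Int.floordiv (board.length : Int) 2) board 0
        · rintro ⟨-, hany⟩
          rw [PySem.List.pyGet?_neg_one, hb] at hany
          simp only [Option.any_some] at hany
          rw [hany] at hc
          simp at hc

-- ===== VERDICT (by name: the statement is the Claim_ definition above) =====
theorem heuristic_py_spec : Claim_equal_heuristic_py := by
  intro board _
  show heuristic_py board = heuristic_py_alt board
  rw [pvA_main board, pvAltEq board]
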